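-- pv_equiv track=rewrite | github.com/lcz79/watch-scanner | backend/scrapers/instagram.py | _hashtags_for_reference
-- ===== SOURCE A (Python) =====
-- HASHTAGS_GENERIC = [
--     "watchforsale",
--     "orologiousato",
--     "orologiusati",
--     "watchreseller",
--     "preloved_watches",
--     "luxurywatchforsale",
-- ]
--
-- def _hashtags_for_reference(reference: str) -> list[str]:
--     """Genera hashtag da cercare per una referenza."""
--     ref_clean = reference.replace('/', '').replace(' ', '').lower()
--     brand_tags = []
--     ref_upper = reference.upper()
--     # Rileva brand dai prefissi comuni
--     if any(ref_upper.startswith(p) for p in ['116', '126', '228', '124']):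
--         brand_tags = ['rolex', 'rolexforsale', 'rolexsubmariner', 'rolexdaytona']
--     elif ref_upper.startswith('57') or ref_upper.startswith('51'):
--         brand_tags = ['patekphilippe', 'patekforsale', 'patekphilippeforsale']
--     elif ref_upper.startswith('15') or ref_upper.startswith('26'):
--         brand_tags = ['audemarspiguet', 'royaloak', 'apforsale']
--
--     return [ref_clean] + brand_tags + HASHTAGS_GENERIC
-- ===== SOURCE B (Python) =====
-- HASHTAGS_GENERIC = [
--     "watchforsale",
--     "orologiousato",
--     "orologiusati",
--     "watchreseller",
--     "preloved_watches",
--     "luxurywatchforsale",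
-- ]
--
-- _ROLEX = ['rolex', 'rolexforsale', 'rolexsubmariner', 'rolexdaytona']
-- _PATEK = ['patekphilippe', 'patekforsale', 'patekphilippeforsale']
-- _AP = ['audemarspiguet', 'royaloak', 'apforsale']
--
--
-- def _brand_tags(s: str) -> list[str]:
--     # Decision tree (a hand-rolled trie) on the leading characters.  All
--     # brand prefixes are digits, so no case-folding is needed, and the
--     # prefix sets are mutually exclusive, so a single descent suffices.
--     if len(s) >= 2:
--         c0, c1 = s[0], s[1]
--         if c0 == '1':
--             if c1 == '1':
--                 if len(s) >= 3 and s[2] == '6':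
--                     return _ROLEX              # 116
--             elif c1 == '2':
--                 if len(s) >= 3 and (s[2] == '6' or s[2] == '4'):
--                     return _ROLEX              # 126, 124
--             elif c1 == '5':
--                 return _AP                     # 15
--         elif c0 == '2':
--             if c1 == '2':
--                 if len(s) >= 3 and s[2] == '8':
--                     return _ROLEX              # 228
--             elif c1 == '6':
--                 return _AP                     # 26
--         elif c0 == '5':
--             if c1 == '7' or c1 == '1':
--                 return _PATEK                  # 57, 51
--     return []
--
--
-- def _hashtags_for_reference(reference: str) -> list[str]:
--     """Genera hashtag da cercare per una referenza."""
--     # one pass over the characters instead of two replace passes + lower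
--     ref_clean = ''.join(ch.lower() for ch in reference if ch != '/' and ch != ' ')
--     return [ref_clean] + _brand_tags(reference) + HASHTAGS_GENERIC
-- ===== Notes on version B (the rewrite author's own statement) =====
-- stated objective: alternative
-- what changed: The chain of startswith tests on the upper-cased reference is replaced by a hand-rolled trie: a single decision-tree descent over the first one-to-three characters (correct because the brand prefix sets are all-digit and mutually exclusive), and the two replace passes plus lower() are fused into one character-level filter-and-lowercase pass.
import Mathlib
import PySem

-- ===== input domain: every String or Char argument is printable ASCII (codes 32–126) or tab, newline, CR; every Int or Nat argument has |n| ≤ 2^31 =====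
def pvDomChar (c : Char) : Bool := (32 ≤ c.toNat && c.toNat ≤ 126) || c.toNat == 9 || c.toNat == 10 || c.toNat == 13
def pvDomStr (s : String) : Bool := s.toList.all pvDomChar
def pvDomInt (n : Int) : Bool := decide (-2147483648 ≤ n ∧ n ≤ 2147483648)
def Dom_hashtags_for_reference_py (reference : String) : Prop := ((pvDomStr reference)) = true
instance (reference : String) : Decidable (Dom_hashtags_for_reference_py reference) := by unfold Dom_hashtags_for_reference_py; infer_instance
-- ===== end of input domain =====

-- ===== PORT A =====
-- B replaces A's startswith chain with a decision-tree (trie) descent over the leading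
-- characters and fuses the two replace passes and lower() into one character pass
-- (objective: alternative, same cost).
def HASHTAGS_GENERIC : List String :=
  ["watchforsale", "orologiousato", "orologiusati", "watchreseller",
   "preloved_watches", "luxurywatchforsale"]

def hashtags_for_reference_py (reference : String) : List String :=
  let ref_clean := PySem.Str.lower (PySem.Str.replace (PySem.Str.replace reference "/" "") " " "")
  let ref_upper := PySem.Str.upper reference
  let brand_tags : List String :=
    if (["116", "126", "228", "124"].any (fun p => PySem.Str.startswith ref_upper p)) then
      ["rolex", "rolexforsale", "rolexsubmariner", "rolexdaytona"]
    else if PySem.Str.startswith ref_upper "57" || PySem.Str.startswith ref_upper "51" then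
      ["patekphilippe", "patekforsale", "patekphilippeforsale"]
    else if PySem.Str.startswith ref_upper "15" || PySem.Str.startswith ref_upper "26" then
      ["audemarspiguet", "royaloak", "apforsale"]
    else []
  [ref_clean] ++ brand_tags ++ HASHTAGS_GENERIC

-- ===== PORT B =====
def pvRolex : List String := ["rolex", "rolexforsale", "rolexsubmariner", "rolexdaytona"]
def pvPatek : List String := ["patekphilippe", "patekforsale", "patekphilippeforsale"]
def pvAp : List String := ["audemarspiguet", "royaloak", "apforsale"]

-- decision-tree descent over the leading characters (Source B's _brand_tags)
def pvBrandTags (s : List Char) : List String :=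
  match s with
  | c0 :: c1 :: rest =>
    if c0 = '1' then
      if c1 = '1' then
        (match rest with
         | c2 :: _ => if c2 = '6' then pvRolex else []       -- 116
         | [] => [])
      else if c1 = '2' then
        (match rest with
         | c2 :: _ => if c2 = '6' || c2 = '4' then pvRolex else []  -- 126, 124
         | [] => [])
      else if c1 = '5' then pvAp                             -- 15
      else []
    else if c0 = '2' then
      if c1 = '2' then
        (match rest with
         | c2 :: _ => if c2 = '8' then pvRolex else []       -- 228
         | [] => [])
      else if c1 = '6' then pvAp                             -- 26
      else []
    else if c0 = '5' then
      if c1 = '7' || c1 = '1' then pvPatek else []           -- 57, 51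
    else []
  | _ => []

def hashtags_for_reference_py_alt (reference : String) : List String :=
  -- ''.join(ch.lower() for ch in reference if ch != '/' and ch != ' ')
  let ref_clean := String.ofList ((reference.toList.filter
      (fun ch => !(ch == '/') && !(ch == ' '))).map PySem.Chars.lowerChar)
  [ref_clean] ++ pvBrandTags reference.toList ++ HASHTAGS_GENERIC

-- ===== PRECONDITION & SPEC =====
def Spec_hashtags_for_reference_py (reference : String) (out : List String) : Prop := out = hashtags_for_reference_py_alt reference
instance (reference : String) (out : List String) : Decidable (Spec_hashtags_for_reference_py reference out) := by unfold Spec_hashtags_for_reference_py; infer_instance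

-- ===== CLAIM (what is proved, stated in full; the proofs are below) =====
def Claim_equal_hashtags_for_reference_py : Prop := ∀ (reference : String), Dom_hashtags_for_reference_py reference → Spec_hashtags_for_reference_py reference (hashtags_for_reference_py reference)

-- ===== LEMMAS AND PROOFS =====

-- upper-casing fixes digit characters, and no character upper-cases TO a digit
theorem pv_upperChar_digit (d : Char) (h1 : '0' ≤ d) (h2 : d ≤ '9') (c : Char) :
    (PySem.Chars.upperChar c = d ↔ c = d) := by
  unfold PySem.Chars.upperChar
  by_cases hc : PySem.Chars.islower c = true
  · rw [if_pos hc]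
    simp only [PySem.Chars.islower, Bool.and_eq_true, decide_eq_true_eq, Char.le_def] at hc
    have hcl : 97 ≤ c.toNat := hc.1
    have hcu : c.toNat ≤ 122 := hc.2
    have hd : d.toNat ≤ 57 := Fin.mk_le_mk.mp h2
    have hv : (Char.ofNat (c.toNat - 32)).toNat = c.toNat - 32 := by
      rw [Char.toNat_ofNat, if_pos (Or.inl (by omega))]
    constructor
    · intro he
      have ht := congrArg Char.toNat he
      rw [hv] at ht
      omega
    · intro he
      subst he
      omega
  · rw [if_neg hc]

-- startswith on an upper-cased string with an all-digit prefix = startswith on the original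
theorem pv_isPrefixOf_upper (p s : List Char) (hp : ∀ d ∈ p, '0' ≤ d ∧ d ≤ '9') :
    p.isPrefixOf (s.map PySem.Chars.upperChar) = p.isPrefixOf s := by
  induction p generalizing s with
  | nil => simp [List.isPrefixOf]
  | cons d p' ih =>
    cases s with
    | nil => simp [List.isPrefixOf]
    | cons c s' =>
      have hd := hp d (List.mem_cons_self ..)
      simp only [List.map, List.isPrefixOf]
      rw [ih s' (fun x hx => hp x (List.mem_cons_of_mem _ hx))]
      congr 1
      by_cases h : c = d
      · subst h; simp [(pv_upperChar_digit c hd.1 hd.2 c).mpr rfl]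
      · have : PySem.Chars.upperChar c ≠ d := fun he => h ((pv_upperChar_digit d hd.1 hd.2 c).mp he)
        rw [show (d == PySem.Chars.upperChar c) = false from beq_eq_false_iff_ne.mpr (fun he => this he.symm),
            show (d == c) = false from beq_eq_false_iff_ne.mpr (fun he => h he.symm)]

-- a startswith test on the upper-cased reference with an all-digit prefix is a take-equality on the raw characters
theorem pv_sw (reference : String) (p : String)
    (hp' : (p.toList.all (fun d => decide ('0' ≤ d) && decide (d ≤ '9'))) = true) :
    PySem.Str.startswith (PySem.Str.upper reference) p
      = decide (reference.toList.take p.toList.length = p.toList) := by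
  have hp : ∀ d ∈ p.toList, '0' ≤ d ∧ d ≤ '9' := by
    intro d hd
    have := List.all_eq_true.mp hp' d hd
    simpa using this
  rw [PySem.Str.startswith_eq, PySem.Str.toList_upper]
  show (p.toList.isPrefixOf (reference.toList.map PySem.Chars.upperChar)) = _
  rw [pv_isPrefixOf_upper _ _ hp]
  rw [Bool.eq_iff_iff]
  simp only [List.isPrefixOf_iff_prefix, List.prefix_iff_eq_take, decide_eq_true_eq]
  exact eq_comm

-- replace with a single-character pattern and empty replacement is a filter
theorem pv_replace_go_single (ch : Char) (fuel : Nat) :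
    ∀ (l acc : List Char), l.length ≤ fuel →
      PySem.Chars.replace.go [ch] [] fuel l acc
        = acc.reverse ++ l.filter (fun c => !(c == ch)) := by
  induction fuel with
  | zero =>
    intro l acc h
    have : l = [] := List.eq_nil_of_length_eq_zero (Nat.le_zero.mp h)
    subst this
    simp [PySem.Chars.replace.go]
  | succ n ih =>
    intro l acc h
    cases l with
    | nil => simp [PySem.Chars.replace.go]
    | cons c t =>
      simp only [PySem.Chars.replace.go, List.isPrefixOf, Bool.and_true]
      by_cases hc : c = ch
      · rw [if_pos (by simp [hc]),
            show List.drop [ch].length (c :: t) = t from rfl]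
        simp only [List.reverse_nil, List.nil_append]
        rw [ih t acc (by simpa using Nat.le_of_succ_le_succ h)]
        simp [hc]
      · rw [if_neg (by simp [Ne.symm hc]),
            ih t (c :: acc) (by simpa using Nat.le_of_succ_le_succ h)]
        simp [hc]

theorem pv_replace_single (s : List Char) (ch : Char) :
    PySem.Chars.replace s [ch] [] = s.filter (fun c => !(c == ch)) := by
  unfold PySem.Chars.replace
  rw [if_neg (by simp), pv_replace_go_single ch s.length s [] (Nat.le_refl _)]
  simp

-- A's staged replace/replace/lower equals B's one-pass filter-and-lowercase
theorem pv_clean_eq (reference : String) :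
    PySem.Str.lower (PySem.Str.replace (PySem.Str.replace reference "/" "") " " "")
      = String.ofList ((reference.toList.filter
          (fun ch => !(ch == '/') && !(ch == ' '))).map PySem.Chars.lowerChar) := by
  apply String.toList_injective
  rw [PySem.Str.toList_lower, PySem.Str.toList_replace, PySem.Str.toList_replace]
  show PySem.Chars.lower (PySem.Chars.replace (PySem.Chars.replace reference.toList ['/'] []) [' '] []) = _
  rw [pv_replace_single, pv_replace_single, PySem.Chars.lower]
  simp only [List.filter_filter, String.toList_ofList]
  congr 1
  exact List.filter_congr (fun c _ => by rw [Bool.and_comm])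

-- A's prefix chain (as take-equalities) equals B's decision tree
theorem pv_brand_eq (l : List Char) :
    (if decide (l.take 3 = ['1','1','6']) || (decide (l.take 3 = ['1','2','6'])
        || (decide (l.take 3 = ['2','2','8']) || decide (l.take 3 = ['1','2','4']))) then
       ["rolex", "rolexforsale", "rolexsubmariner", "rolexdaytona"]
     else if decide (l.take 2 = ['5','7']) || decide (l.take 2 = ['5','1']) then
       ["patekphilippe", "patekforsale", "patekphilippeforsale"]
     else if decide (l.take 2 = ['1','5']) || decide (l.take 2 = ['2','6']) then
       ["audemarspiguet", "royaloak", "apforsale"]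
     else []) = pvBrandTags l := by
  match l with
  | [] => simp [pvBrandTags, List.take]
  | [a] => simp [pvBrandTags, List.take]
  | a :: b :: r =>
    cases r with
    | nil =>
      simp only [pvBrandTags, List.take, List.cons.injEq, and_true]
      split_ifs <;> simp_all [pvPatek, pvAp]
    | cons c r' =>
      simp only [pvBrandTags, List.take, List.cons.injEq, and_true]
      split_ifs <;> simp_all [pvRolex, pvPatek, pvAp]

-- ===== VERDICT (by name: the statement is the Claim_ definition above) =====
set_option maxRecDepth 8192 in
theorem hashtags_for_reference_py_spec : Claim_equal_hashtags_for_reference_py := by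
  intro reference _
  unfold Spec_hashtags_for_reference_py hashtags_for_reference_py hashtags_for_reference_py_alt
  rw [pv_clean_eq]
  simp only [List.any_cons, List.any_nil, Bool.or_false,
    pv_sw reference "116" (by rfl), pv_sw reference "126" (by rfl),
    pv_sw reference "228" (by rfl), pv_sw reference "124" (by rfl),
    pv_sw reference "57" (by rfl), pv_sw reference "51" (by rfl),
    pv_sw reference "15" (by rfl), pv_sw reference "26" (by rfl)]
  rw [show ("116" : String).toList = ['1','1','6'] from rfl,
      show ("126" : String).toList = ['1','2','6'] from rfl,
      show ("228" : String).toList = ['2','2','8'] from rfl,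
      show ("124" : String).toList = ['1','2','4'] from rfl,
      show ("57" : String).toList = ['5','7'] from rfl,
      show ("51" : String).toList = ['5','1'] from rfl,
      show ("15" : String).toList = ['1','5'] from rfl,
      show ("26" : String).toList = ['2','6'] from rfl]
  simp only [List.length_cons, List.length_nil, Nat.zero_add, Nat.reduceAdd]
  rw [pv_brand_eq reference.toList]
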